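-- pv_equiv track=rewrite | github.com/tan90cot0/COL334-Computer-Networks | Ass2 - A Peer-Server-Peer Filesharing System/server_functions2.py | divide_into_chunks
-- ===== SOURCE A (Python) =====
-- def divide_into_chunks(data, n):
--     chunks = []
--     client_chunks = []
--
--     st = data
--     size = 1000
--     chunks = [[st[i:i+size], str(i//size)] for i in range(0, len(st), size)]
--     chunks_copy = chunks
--     num_each = len(chunks)//n
--     for i in range(n):
--         client_chunks.append(chunks[:num_each])
--         chunks = chunks[num_each:]
--     for i in range(len(chunks)%n):
--         client_chunks[i].append(chunks[0])
--         chunks.pop(0)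
--     return chunks_copy, client_chunks
-- ===== SOURCE B (Python) =====
-- def divide_into_chunks(data, n):
--     size = 1000
--     chunks = [[data[i:i + size], str(i // size)] for i in range(0, len(data), size)]
--     q, r = divmod(len(chunks), n)
--     client_chunks = [
--         chunks[i * q:(i + 1) * q]
--         + (chunks[n * q + i:n * q + i + 1] if i < r else [])
--         for i in range(n)
--     ]
--     return chunks, client_chunks
-- ===== Notes on version B (the rewrite author's own statement) =====
-- stated objective: faster
-- what changed: A builds each client's block by repeatedly re-slicing the remaining chunk list n times and then pops leftovers off the front one by one; B computes every client's contiguous block and its optional extra chunk directly by index arithmetic (i*q:(i+1)*q plus chunk n*q+i for i<r) in one pass over the clients.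
import Mathlib
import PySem

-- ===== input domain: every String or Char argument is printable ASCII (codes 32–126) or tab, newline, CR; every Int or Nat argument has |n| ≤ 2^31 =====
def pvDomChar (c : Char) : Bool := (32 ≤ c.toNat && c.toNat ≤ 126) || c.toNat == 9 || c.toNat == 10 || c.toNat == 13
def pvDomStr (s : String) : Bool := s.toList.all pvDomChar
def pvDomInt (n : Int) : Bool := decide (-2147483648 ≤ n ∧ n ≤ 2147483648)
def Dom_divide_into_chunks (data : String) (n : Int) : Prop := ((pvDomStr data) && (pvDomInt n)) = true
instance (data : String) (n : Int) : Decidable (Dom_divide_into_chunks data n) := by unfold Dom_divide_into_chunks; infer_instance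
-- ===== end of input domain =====

-- B replaces A's repeated re-slicing of the shrinking chunk list (and the pop-one-by-one leftover loop) by direct index arithmetic per client; only return values are compared (A mutates only its own locals).

-- ===== PORT A =====
-- the line both sources share: chunks = [[st[i:i+size], str(i//size)] for i in range(0, len(st), size)], size = 1000
def pvMkChunks (st : String) : List (List String) :=
  (PySem.List.pyRange 0 (PySem.Str.len st) 1000).map
    (fun i => [PySem.Str.slice st (some i) (some (i + 1000)), PySem.Int.toStr (PySem.Int.floordiv i 1000)])

-- client_chunks[i].append(x) — exact for 0 ≤ i < cc.length, the only indices the loop reaches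
def pvSetAppend {α : Type} (cc : List (List α)) (i : Int) (x : α) : List (List α) :=
  cc.set i.toNat ((cc.getD i.toNat []) ++ [x])

def divide_into_chunks (data : String) (n : Int) : List (List String) × List (List (List String)) :=
  let chunks := pvMkChunks data
  let chunks_copy := chunks
  let num_each := PySem.Int.floordiv ((chunks.length : Int)) n
  -- for i in range(n): client_chunks.append(chunks[:num_each]); chunks = chunks[num_each:]
  let s1 := (PySem.List.pyRange 0 n 1).foldl
    (fun (s : List (List (List String)) × List (List String)) _ =>
      (s.1 ++ [PySem.List.slice s.2 none (some num_each)],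
       PySem.List.slice s.2 (some num_each) none))
    ([], chunks)
  -- for i in range(len(chunks)%n): client_chunks[i].append(chunks[0]); chunks.pop(0)
  let rem := PySem.Int.mod ((s1.2.length : Int)) n
  let s2 := (PySem.List.pyRange 0 rem 1).foldl
    (fun (s : List (List (List String)) × List (List String)) i =>
      (PySem.List.pop? s.2 0).elim s (fun p => (pvSetAppend s.1 i p.1, p.2)))
    s1   -- chunks[0] / chunks.pop(0) via pop?; the none branch is unreachable when n ≠ 0
  (chunks_copy, s2.1)

-- ===== PORT B =====
def divide_into_chunks_alt (data : String) (n : Int) : List (List String) × List (List (List String)) :=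
  let chunks := pvMkChunks data
  let q := PySem.Int.floordiv ((chunks.length : Int)) n
  let r := PySem.Int.mod ((chunks.length : Int)) n
  let client_chunks := (PySem.List.pyRange 0 n 1).map
    (fun i =>
      PySem.List.slice chunks (some (i * q)) (some ((i + 1) * q)) ++
      (if i < r then PySem.List.slice chunks (some (n * q + i)) (some (n * q + i + 1)) else []))
  (chunks, client_chunks)

-- ===== PRECONDITION & SPEC =====
-- Python A raises ZeroDivisionError exactly when n = 0 (len(chunks)//n); B raises there too.
def Pre_divide_into_chunks (data : String) (n : Int) : Prop := n ≠ 0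
instance (data : String) (n : Int) : Decidable (Pre_divide_into_chunks data n) := by unfold Pre_divide_into_chunks; infer_instance
def pvWitness_divide_into_chunks : String × Int := ("hello", 2)

def Spec_divide_into_chunks (data : String) (n : Int) (out : List (List String) × List (List (List String))) : Prop := out = divide_into_chunks_alt data n
instance (data : String) (n : Int) (out : List (List String) × List (List (List String))) : Decidable (Spec_divide_into_chunks data n out) := by unfold Spec_divide_into_chunks; infer_instance

-- ===== CLAIM (what is proved, stated in full; the proofs are below) =====
def Claim_equal_divide_into_chunks : Prop := ∀ (data : String) (n : Int), Dom_divide_into_chunks data n → Pre_divide_into_chunks data n → Spec_divide_into_chunks data n (divide_into_chunks data n)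

-- ===== LEMMAS AND PROOFS =====

-- A's first loop: n successive head-slices of the shrinking list are the blocks [j*q, (j+1)*q).
theorem pv_loop1 {α : Type} (l : List Int) (q : Nat) (acc : List (List α)) (rest : List α) :
    l.foldl
      (fun (s : List (List α) × List α) _ =>
        (s.1 ++ [PySem.List.slice s.2 none (some (q : Int))],
         PySem.List.slice s.2 (some (q : Int)) none))
      (acc, rest)
    = (acc ++ (List.range l.length).map (fun j => (rest.drop (j * q)).take q),
       rest.drop (l.length * q)) := by
  induction l generalizing acc rest with
  | nil => simp
  | cons x t ih =>
    simp only [List.foldl_cons]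
    rw [ih]
    simp only [PySem.List.slice_to_natCast, PySem.List.slice_from_natCast]
    refine Prod.ext ?_ ?_
    · simp only [List.length_cons, List.range_succ_eq_map, List.map_cons, List.map_map,
        Nat.zero_mul, List.drop_zero, List.append_assoc]
      simp only [List.singleton_append]
      congr 2
      apply List.map_congr_left
      intro j _
      simp only [Function.comp_apply, List.drop_drop, Nat.succ_eq_add_one]
      congr 2
      ring
    · simp only [List.length_cons, List.drop_drop]
      congr 2
      ring

-- A's second loop: appending the m leftovers to clients k, k+1, …, k+m-1.
theorem pv_loop2 {α : Type} (m : Nat) (k : Nat) (cc : List (List α)) (rest : List α)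
    (hm : m ≤ rest.length) (hk : k + m ≤ cc.length) :
    (PySem.List.pyRange (k : Int) ((k : Int) + (m : Int)) 1).foldl
      (fun (s : List (List α) × List α) i =>
        (PySem.List.pop? s.2 0).elim s (fun p => (pvSetAppend s.1 i p.1, p.2)))
      (cc, rest)
    = (cc.take k ++ List.zipWith (fun c x => c ++ [x]) (cc.drop k) (rest.take m) ++ cc.drop (k + m),
       rest.drop m) := by
  induction m generalizing k cc rest with
  | zero =>
    rw [show ((k:Int) + (0:Nat) : Int) = (k:Int) by simp, PySem.List.pyRange_one_eq_nil le_rfl]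
    simp
  | succ m ih =>
    obtain ⟨x, rest', rfl⟩ : ∃ x rest', rest = x :: rest' := by
      cases rest with
      | nil => simp at hm
      | cons a b => exact ⟨a, b, rfl⟩
    rw [PySem.List.pyRange_one_cons (by push_cast; omega)]
    simp only [List.foldl_cons, PySem.List.pop?_zero_cons, Option.elim_some]
    have hklt : k < cc.length := by omega
    have hset : pvSetAppend cc (k : Int) x = cc.set k (cc[k] ++ [x]) := by
      simp only [pvSetAppend, Int.toNat_natCast]
      rw [List.getD_eq_getElem _ _ hklt]
    rw [hset]
    rw [show ((k:Int) + 1 : Int) = ((k+1 : Nat) : Int) by push_cast; ring,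
        show ((k:Int) + ((m+1 : Nat) : Int) : Int) = (((k+1):Nat):Int) + ((m:Nat):Int) by push_cast; ring]
    rw [ih (k+1) _ _ (by simpa using hm) (by simp; omega)]
    refine Prod.ext ?_ rfl
    have hset_eq : cc.set k (cc[k] ++ [x]) = cc.take k ++ (cc[k] ++ [x]) :: cc.drop (k+1) := by
      rw [List.set_eq_take_append_cons_drop, if_pos hklt]
    rw [hset_eq, List.drop_eq_getElem_cons hklt]
    have htk : (cc.take k).length = k := by rw [List.length_take]; omega
    simp only [List.take_append, List.drop_append, htk, List.take_take]
    have h4 : List.drop (k+1) (List.take k cc) = [] := List.drop_eq_nil_of_le (by simp)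
    have h5 : List.drop (k+1+m) (List.take k cc) = [] := List.drop_eq_nil_of_le (by simp; omega)
    rw [show min (k+1) k = k by omega, show k + 1 - k = 1 from by omega,
        show k + 1 + m - k = m + 1 from by omega, h4, h5]
    simp only [List.take_succ_cons, List.take_zero, List.drop_succ_cons, List.nil_append,
      List.zipWith_cons_cons, List.drop_drop, List.append_assoc,
      List.singleton_append]
    rw [Nat.add_zero, show k + 1 + m = k + (m + 1) from by omega]

-- the second loop started at client 0
theorem pv_loop2_zero {α : Type} (m : Nat) (cc : List (List α)) (rest : List α)
    (hm : m ≤ rest.length) (hk : m ≤ cc.length) :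
    (PySem.List.pyRange 0 (m : Int) 1).foldl
      (fun (s : List (List α) × List α) i =>
        (PySem.List.pop? s.2 0).elim s (fun p => (pvSetAppend s.1 i p.1, p.2)))
      (cc, rest)
    = (List.zipWith (fun c x => c ++ [x]) cc (rest.take m) ++ cc.drop m, rest.drop m) := by
  have h := pv_loop2 m 0 cc rest hm (by omega)
  simpa using h

-- base blocks + appended leftovers, written per client index
theorem pv_combine {α : Type} (C : List α) (N qn rn : Nat) (hrnN : rn ≤ N)
    (key : N * qn + rn = C.length) :
    List.zipWith (fun c x => c ++ [x])
        ((List.range N).map (fun j => (C.drop (j * qn)).take qn))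
        ((C.drop (N * qn)).take rn)
      ++ ((List.range N).map (fun j => (C.drop (j * qn)).take qn)).drop rn
    = (List.range N).map
        (fun j => (C.drop (j * qn)).take qn ++ if j < rn then (C.drop (N * qn + j)).take 1 else []) := by
  have hdl : (C.drop (N * qn)).length = rn := by simp [List.length_drop]; omega
  apply List.ext_getElem
  · simp [List.length_zipWith, hdl]; omega
  · intro j hj1 hj2
    have hjN : j < N := by simpa using hj2
    rw [List.getElem_append]
    by_cases hjr : j < rn
    · rw [dif_pos (by simp [List.length_zipWith, hdl]; omega)]
      rw [List.getElem_zipWith]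
      simp only [List.getElem_map, List.getElem_range, List.getElem_take, List.getElem_drop]
      rw [if_pos hjr]
      have hlt : N * qn + j < C.length := by omega
      rw [List.drop_eq_getElem_cons hlt, List.take_succ_cons, List.take_zero]
    · rw [dif_neg (by simp [List.length_zipWith, hdl]; omega)]
      have hzl : (List.zipWith (fun c x => c ++ [x])
          ((List.range N).map (fun j => (C.drop (j * qn)).take qn))
          ((C.drop (N * qn)).take rn)).length = rn := by
        simp [List.length_zipWith, hdl]; omega
      simp only [hzl]
      rw [List.getElem_drop]
      simp only [List.getElem_map, List.getElem_range]
      rw [show rn + (j - rn) = j from by omega, if_neg hjr, List.append_nil]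


-- the whole client distribution: A's two loops equal B's per-index map, for any chunk list C
theorem pv_main {α : Type} (C : List α) (n : Int) (hn : n ≠ 0) :
    (List.foldl
        (fun (s : List (List α) × List α) i =>
          (PySem.List.pop? s.2 0).elim s (fun p => (pvSetAppend s.1 i p.1, p.2)))
        (List.foldl
          (fun (s : List (List α) × List α) _ =>
            (s.1 ++ [PySem.List.slice s.2 none (some (PySem.Int.floordiv ((C.length : Int)) n))],
              PySem.List.slice s.2 (some (PySem.Int.floordiv ((C.length : Int)) n)) none))
          ([], C) (PySem.List.pyRange 0 n 1))
        (PySem.List.pyRange 0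
          (PySem.Int.mod
            (((List.foldl
                (fun (s : List (List α) × List α) _ =>
                  (s.1 ++ [PySem.List.slice s.2 none (some (PySem.Int.floordiv ((C.length : Int)) n))],
                    PySem.List.slice s.2 (some (PySem.Int.floordiv ((C.length : Int)) n)) none))
                ([], C) (PySem.List.pyRange 0 n 1)).2.length : Int)) n) 1)).1
    = List.map
        (fun i =>
          PySem.List.slice C (some (i * PySem.Int.floordiv ((C.length : Int)) n))
              (some ((i + 1) * PySem.Int.floordiv ((C.length : Int)) n)) ++
            if i < PySem.Int.mod ((C.length : Int)) n then
              PySem.List.slice C (some (n * PySem.Int.floordiv ((C.length : Int)) n + i))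
                (some (n * PySem.Int.floordiv ((C.length : Int)) n + i + 1))
            else [])
        (PySem.List.pyRange 0 n 1) := by
  rcases lt_or_gt_of_ne hn with hneg | hpos
  · rw [PySem.List.pyRange_one_eq_nil (le_of_lt hneg)]
    simp only [List.foldl_nil, List.map_nil]
    rw [PySem.List.pyRange_one_eq_nil (PySem.Int.mod_neg_bounds _ hneg).2]
    rfl
  · obtain ⟨N, rfl⟩ : ∃ N : Nat, ((N : Nat) : Int) = n := ⟨n.toNat, Int.toNat_of_nonneg (le_of_lt hpos)⟩
    have hN0 : 0 < N := by exact_mod_cast hpos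
    simp only [PySem.Int.floordiv_natCast, PySem.Int.mod_natCast]
    obtain ⟨qn, hqn⟩ : ∃ q, C.length / N = q := ⟨_, rfl⟩
    obtain ⟨rn, hrn⟩ : ∃ r, C.length % N = r := ⟨_, rfl⟩
    have key : N * qn + rn = C.length := by rw [← hqn, ← hrn]; exact Nat.div_add_mod C.length N
    have hrnN : rn < N := hrn ▸ Nat.mod_lt _ hN0
    simp only [hqn, hrn]
    rw [pv_loop1]
    simp only [PySem.List.length_pyRange_one, Int.sub_zero, Int.toNat_natCast, List.nil_append]
    rw [List.length_drop]
    rw [show (C.length - N * qn) % N = rn from by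
          rw [show C.length - N * qn = rn from by omega]; exact Nat.mod_eq_of_lt hrnN]
    rw [pv_loop2_zero rn _ _
        (by rw [List.length_drop]; omega)
        (by simp only [List.length_map, List.length_range]; omega)]
    rw [pv_combine C N qn rn (le_of_lt hrnN) key]
    rw [PySem.List.pyRange_one]
    simp only [Int.sub_zero, Int.toNat_natCast, List.map_map]
    apply List.map_congr_left
    intro j hj
    simp only [Function.comp_apply, zero_add]
    rw [show ((j : Int) * ((qn : Nat) : Int)) = ((j * qn : Nat) : Int) from by push_cast; ring,
        show (((j : Int) + 1) * ((qn : Nat) : Int)) = (((j + 1) * qn : Nat) : Int) from by push_cast; ring,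
        PySem.List.slice_natCast]
    congr 1
    · rw [show (j + 1) * qn - j * qn = qn from by rw [Nat.add_mul, one_mul]; omega]
    · by_cases hjr : j < rn
      · rw [if_pos hjr, if_pos (show ((j : Int)) < ((rn : Nat) : Int) from by exact_mod_cast hjr),
            show ((N : Int) * ((qn : Nat) : Int) + (j : Int)) = ((N * qn + j : Nat) : Int) from by push_cast; ring,
            show ((N * qn + j : Nat) : Int) + 1 = ((N * qn + j + 1 : Nat) : Int) from by push_cast; ring,
            PySem.List.slice_natCast,
            show N * qn + j + 1 - (N * qn + j) = 1 from by omega]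
      · rw [if_neg hjr, if_neg (show ¬ ((j : Int)) < ((rn : Nat) : Int) from by exact_mod_cast hjr)]

-- ===== VERDICT (by name: the statement is the Claim_ definition above) =====
theorem divide_into_chunks_spec : Claim_equal_divide_into_chunks := by
  intro data n _ hn
  unfold Spec_divide_into_chunks
  show divide_into_chunks data n = divide_into_chunks_alt data n
  simp only [divide_into_chunks, divide_into_chunks_alt]
  rw [Prod.mk.injEq]
  exact ⟨rfl, pv_main (pvMkChunks data) n hn⟩
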